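-- pv_equiv track=rewrite | github.com/luxferre-code/pychat-projet | client/background.py | transfo_str_to_list_server
-- ===== SOURCE A (Python) =====
-- def transfo_str_to_list_server(string: str):
--     """
--     # Juliann Lestrelin 24.03.2022
--     """
--     final = []
--     temps = ''
--     for elt in string:
--         if(elt != '/'): temps += elt
--         else:
--             final.append(temps + '\n')
--             temps = ''
--     final.append(temps)
--     for _ in range(6 - len(final)):
--         final.append('\n')
--     return final
-- ===== SOURCE B (Python) =====
-- def transfo_str_to_list_server(string: str):
--     parts = string.split('/')
--     final = [p + '\n' for p in parts[:-1]] + [parts[-1]]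
--     final += ['\n'] * (6 - len(final))
--     return final
-- ===== Notes on version B (the rewrite author's own statement) =====
-- stated objective: simpler
-- what changed: B replaces A's manual character-accumulator loop with str.split plus a comprehension that suffixes a newline to all but the last part, and A's range-append padding loop with list repetition.
import Mathlib
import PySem

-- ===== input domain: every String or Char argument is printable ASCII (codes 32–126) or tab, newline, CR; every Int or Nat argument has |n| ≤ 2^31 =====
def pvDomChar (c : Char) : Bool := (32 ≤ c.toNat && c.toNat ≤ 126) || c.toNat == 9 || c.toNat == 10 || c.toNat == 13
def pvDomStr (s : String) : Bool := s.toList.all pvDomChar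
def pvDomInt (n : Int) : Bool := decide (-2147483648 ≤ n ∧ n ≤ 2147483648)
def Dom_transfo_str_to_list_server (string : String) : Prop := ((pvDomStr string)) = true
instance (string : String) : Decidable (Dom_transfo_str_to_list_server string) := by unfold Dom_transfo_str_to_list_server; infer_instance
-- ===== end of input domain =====

-- B replaces A's manual character-accumulator loop with str.split('/') plus a comprehension, and A's range-append padding loop with list repetition (simpler).

-- ===== PORT A =====
-- one loop iteration of A: accumulate the char, or flush temps + '\n' on '/'
def pvStepA (st : List String × String) (elt : Char) : List String × String :=
  if elt ≠ '/' then (st.1, st.2.push elt) else (st.1 ++ [st.2 ++ "\n"], "")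

def transfo_str_to_list_server (string : String) : List String :=
  let st := string.toList.foldl pvStepA ([], "")
  let final := st.1 ++ [st.2]
  (PySem.List.pyRange 0 (6 - (final.length : Int)) 1).foldl (fun f _ => f ++ ["\n"]) final

-- ===== PORT B =====
def transfo_str_to_list_server_alt (string : String) : List String :=
  let parts := (PySem.Str.split? string "/").getD []   -- string.split('/'); sep ≠ "" so never none
  let final := (PySem.List.slice parts none (some (-1))).map (fun p => p ++ "\n")
                 ++ [(PySem.List.pyGet? parts (-1)).getD ""]   -- parts is never empty, so pyGet? is some
  final ++ List.replicate (6 - final.length) "\n"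

-- ===== PRECONDITION & SPEC =====
def Spec_transfo_str_to_list_server (string : String) (out : List String) : Prop := out = transfo_str_to_list_server_alt string
instance (string : String) (out : List String) : Decidable (Spec_transfo_str_to_list_server string out) := by unfold Spec_transfo_str_to_list_server; infer_instance

-- ===== CLAIM (what is proved, stated in full; the proofs are below) =====
def Claim_equal_transfo_str_to_list_server : Prop := ∀ (string : String), Dom_transfo_str_to_list_server string → Spec_transfo_str_to_list_server string (transfo_str_to_list_server string)

-- ===== LEMMAS AND PROOFS =====

-- reference split-on-'/' recursion, over List Char
def pvSpC : List Char → List Char → List (List Char)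
  | cur, [] => [cur]
  | cur, c :: r => if c = '/' then cur :: pvSpC [] r else pvSpC (cur ++ [c]) r

-- the same recursion with a String accumulator
def pvSpS : String → List Char → List String
  | cur, [] => [cur]
  | cur, c :: r => if c = '/' then cur :: pvSpS "" r else pvSpS (cur.push c) r

-- '\n' appended to every part but the last
def pvMapNl : List String → List String
  | [] => []
  | [p] => [p]
  | p :: q :: r => (p ++ "\n") :: pvMapNl (q :: r)

theorem pv_go_eq (l : List Char) : ∀ (fuel : Nat) (cur : List Char) (accs : List (List Char)),
    l.length ≤ fuel →
    PySem.Chars.splitOn.go ['/'] fuel l cur accs = accs.reverse ++ pvSpC cur.reverse l := by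
  induction l with
  | nil =>
    intro fuel cur accs _
    cases fuel <;> simp [PySem.Chars.splitOn.go, pvSpC]
  | cons c r ih =>
    intro fuel cur accs hle
    cases fuel with
    | zero => simp at hle
    | succ f =>
      simp only [PySem.Chars.splitOn.go]
      by_cases hc : c = '/'
      · subst hc
        rw [if_pos (by simp [List.isPrefixOf])]
        norm_num [List.drop_one]
        rw [ih f [] (cur.reverse :: accs) (by simpa using Nat.le_of_succ_le_succ hle)]
        simp [pvSpC]
      · rw [if_neg (by simp [List.isPrefixOf]; exact fun h => hc h.symm)]
        rw [ih f (c :: cur) accs (by simpa using Nat.le_of_succ_le_succ hle)]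
        simp [pvSpC, hc]

theorem pv_splitOn_eq (cs : List Char) : PySem.Chars.splitOn cs ['/'] = pvSpC [] cs := by
  have := pv_go_eq cs (cs.length + 1) [] [] (by omega)
  simpa [PySem.Chars.splitOn] using this

theorem pvSpS_eq (l : List Char) : ∀ (cur : String),
    pvSpS cur l = (pvSpC cur.toList l).map String.ofList := by
  induction l with
  | nil => intro cur; simp [pvSpS, pvSpC]
  | cons c r ih =>
    intro cur
    simp only [pvSpS, pvSpC]
    split_ifs with hc
    · simp [ih]
    · rw [ih]
      have : (cur.push c).toList = cur.toList ++ [c] := by simp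
      rw [this]

theorem pvSpS_ne_nil (l : List Char) (cur : String) : pvSpS cur l ≠ [] := by
  induction l generalizing cur with
  | nil => simp [pvSpS]
  | cons c r ih => simp only [pvSpS]; split_ifs <;> simp [ih]

theorem pvMapNl_cons (p : String) (ps : List String) (h : ps ≠ []) :
    pvMapNl (p :: ps) = (p ++ "\n") :: pvMapNl ps := by
  cases ps with
  | nil => exact absurd rfl h
  | cons q r => rfl

theorem pv_loop_eq (l : List Char) : ∀ (final : List String) (temps : String),
    (l.foldl pvStepA (final, temps)).1 ++ [(l.foldl pvStepA (final, temps)).2]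
      = final ++ pvMapNl (pvSpS temps l) := by
  induction l with
  | nil => intro final temps; simp [pvSpS, pvMapNl]
  | cons c r ih =>
    intro final temps
    simp only [List.foldl_cons, pvStepA, pvSpS]
    by_cases hc : c = '/'
    · subst hc
      rw [if_neg (by simp), if_pos rfl, ih]
      rw [pvMapNl_cons _ _ (pvSpS_ne_nil _ _)]
      simp
    · rw [if_pos (by simp [hc]), if_neg hc, ih]

theorem pv_core_eq (ps : List String) (h : ps ≠ []) :
    (PySem.List.slice ps none (some (-1))).map (fun p => p ++ "\n")
      ++ [(PySem.List.pyGet? ps (-1)).getD ""] = pvMapNl ps := by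
  induction ps with
  | nil => exact absurd rfl h
  | cons p r ih =>
    cases r with
    | nil => simp [PySem.List.slice_to_neg_one, PySem.List.pyGet?, PySem.List.pyIdx?, pvMapNl]
    | cons q t =>
      rw [pvMapNl_cons _ _ (by simp)]
      rw [← ih (by simp)]
      rw [PySem.List.slice_to_neg_one, PySem.List.slice_to_neg_one]
      simp only [List.dropLast_cons_of_ne_nil (by simp : q :: t ≠ []), List.map_cons, List.cons_append]
      congr 2
      simp only [PySem.List.pyGet?, PySem.List.pyIdx?]
      norm_num
      rfl

theorem pv_foldl_append (l : List Int) (final : List String) (x : String) :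
    l.foldl (fun f _ => f ++ [x]) final = final ++ List.replicate l.length x := by
  induction l generalizing final with
  | nil => simp
  | cons a r ih =>
    rw [List.foldl_cons, ih, List.append_assoc]
    congr 1

theorem pv_pad_eq (final : List String) :
    (PySem.List.pyRange 0 (6 - (final.length : Int)) 1).foldl (fun f _ => f ++ ["\n"]) final
      = final ++ List.replicate (6 - final.length) "\n" := by
  rw [pv_foldl_append]
  congr 1
  congr 1
  simp only [PySem.List.pyRange]
  norm_num
  split_ifs with h <;> omega

theorem pv_parts_eq (s : String) :
    (PySem.Str.split? s "/").getD [] = pvSpS "" s.toList := by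
  have hcs : ("/" : String).toList = ['/'] := rfl
  rw [PySem.Str.split?, hcs, PySem.Chars.split?]
  rw [if_neg (by decide)]
  rw [pv_splitOn_eq]
  rw [pvSpS_eq]
  rfl

-- ===== VERDICT (by name: the statement is the Claim_ definition above) =====
theorem transfo_str_to_list_server_spec : Claim_equal_transfo_str_to_list_server := by
  intro s _
  unfold Spec_transfo_str_to_list_server transfo_str_to_list_server transfo_str_to_list_server_alt
  simp only
  rw [pv_pad_eq, pv_parts_eq, pv_core_eq _ (pvSpS_ne_nil _ _), pv_loop_eq]
  simp
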